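-- pv_equiv track=rewrite | github.com/yyht/OmniEvent | OpenEE/input_engineering/seq2seq_processor_hybrid.py | insert_marker
-- ===== SOURCE A (Python) =====
-- def insert_marker(text, type, trigger_pos, markers, whitespace=True):
--     space = " " if whitespace else ""
--     markered_text = ""
--     tokens = text.split()
--     char_pos = 0
--     for i, token in enumerate(tokens):
--         if char_pos == trigger_pos[0]:
--             markered_text += markers[type][0] + space
--         char_pos += len(token) + len(space)
--         markered_text += token + space
--         if char_pos == trigger_pos[1] + len(space):
--             markered_text += markers[type][1] + space
--     markered_text = markered_text.strip()
--     return markered_text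
-- ===== SOURCE B (Python) =====
-- def insert_marker(text, type, trigger_pos, markers, whitespace=True):
--     # locate-then-assemble: precompute each token's (before, after) char offsets,
--     # find the marker slots once, then join the token list with the markers spliced in
--     space = " " if whitespace else ""
--     tokens = text.split()
--     if not tokens:
--         return ""
--     offs = []
--     off = 0
--     for tok in tokens:
--         offs.append((off, off + len(tok)))
--         off += len(tok) + len(space)
--     open_idx = next((i for i, (b, a) in enumerate(offs) if b == trigger_pos[0]), None)
--     close_idx = next((i for i, (b, a) in enumerate(offs) if a == trigger_pos[1]), None)
--     parts = []
--     for i, tok in enumerate(tokens):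
--         if i == open_idx:
--             parts.append(markers[type][0])
--         parts.append(tok)
--         if i == close_idx:
--             parts.append(markers[type][1])
--     return space.join(parts).strip()
-- ===== Notes on version B (the rewrite author's own statement) =====
-- stated objective: alternative
-- what changed: A emits the marked string in one loop that carries a running char offset and compares it against the trigger span at every token; B instead precomputes each token's (before, after) char offsets in one pass, locates the open/close marker slots once with a find, and then assembles the token list with the two markers spliced in and joins it.
import Mathlib
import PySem

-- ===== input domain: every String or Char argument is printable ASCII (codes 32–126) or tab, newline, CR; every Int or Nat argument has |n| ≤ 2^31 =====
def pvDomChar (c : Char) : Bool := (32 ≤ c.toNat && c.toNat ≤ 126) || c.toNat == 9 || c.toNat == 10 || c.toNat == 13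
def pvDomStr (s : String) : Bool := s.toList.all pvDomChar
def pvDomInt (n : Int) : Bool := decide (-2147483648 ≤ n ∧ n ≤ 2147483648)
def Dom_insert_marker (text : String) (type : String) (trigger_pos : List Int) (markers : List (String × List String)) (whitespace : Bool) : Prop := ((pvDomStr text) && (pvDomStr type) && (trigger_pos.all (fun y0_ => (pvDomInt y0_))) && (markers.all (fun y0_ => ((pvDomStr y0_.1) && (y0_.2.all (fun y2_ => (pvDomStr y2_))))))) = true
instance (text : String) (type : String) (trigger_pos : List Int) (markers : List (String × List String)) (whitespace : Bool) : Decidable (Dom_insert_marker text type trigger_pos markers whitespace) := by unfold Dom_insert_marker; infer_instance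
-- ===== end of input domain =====

-- B replaces A's single emitting loop (running char counter compared against the trigger span
-- at every token, markers appended inline) by a locate-then-assemble decomposition: compute each
-- token's (before, after) char offsets once, find the two marker slots, then join the token list
-- with the markers spliced in.  Objective: alternative decomposition (same cost).

-- ===== PORT A =====
-- trigger_pos[0] / trigger_pos[1] and markers[type][0/1] are ported with pyGetD / Dict.getD;
-- Pre_insert_marker guarantees every access Python actually performs is in range.
def insert_marker (text : String) (type : String) (trigger_pos : List Int) (markers : List (String × List String)) (whitespace : Bool) : String :=
  let space : List Char := if whitespace then [' '] else []
  let tokens : List (List Char) := PySem.Chars.split₀ text.toList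
  let r := tokens.foldl (fun (p : List Char × Int) token =>
      let markered := if p.2 = PySem.List.pyGetD trigger_pos 0 0 then
          p.1 ++ (PySem.List.pyGetD (PySem.Dict.getD (PySem.Dict.mk markers) type []) 0 "").toList ++ space
        else p.1
      let char_pos := p.2 + (token.length : Int) + (space.length : Int)
      let markered := markered ++ token ++ space
      let markered := if char_pos = PySem.List.pyGetD trigger_pos 1 0 + (space.length : Int) then
          markered ++ (PySem.List.pyGetD (PySem.Dict.getD (PySem.Dict.mk markers) type []) 1 "").toList ++ space
        else markered
      (markered, char_pos)) ([], 0)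
  String.ofList (PySem.Chars.strip r.1)

-- ===== PORT B =====
def insert_marker_alt (text : String) (type : String) (trigger_pos : List Int) (markers : List (String × List String)) (whitespace : Bool) : String :=
  let space : List Char := if whitespace then [' '] else []
  let tokens : List (List Char) := PySem.Chars.split₀ text.toList
  if tokens = [] then "" else
  let offs := (tokens.foldl (fun (p : List (Int × Int) × Int) tok =>
      (p.1 ++ [(p.2, p.2 + (tok.length : Int))], p.2 + (tok.length : Int) + (space.length : Int))) ([], 0)).1
  let openIdx : Option Int :=
    ((PySem.List.enumerate offs).find? (fun p => p.2.1 == PySem.List.pyGetD trigger_pos 0 0)).map (·.1)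
  let closeIdx : Option Int :=
    ((PySem.List.enumerate offs).find? (fun p => p.2.2 == PySem.List.pyGetD trigger_pos 1 0)).map (·.1)
  let parts := (PySem.List.enumerate tokens).foldl (fun (acc : List (List Char)) p =>
      let acc := if openIdx == some p.1 then
          acc ++ [(PySem.List.pyGetD (PySem.Dict.getD (PySem.Dict.mk markers) type []) 0 "").toList] else acc
      let acc := acc ++ [p.2]
      if closeIdx == some p.1 then
          acc ++ [(PySem.List.pyGetD (PySem.Dict.getD (PySem.Dict.mk markers) type []) 1 "").toList] else acc) []
  String.ofList (PySem.Chars.strip (PySem.Chars.join space parts))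

-- ===== PRECONDITION & SPEC =====
-- (before, after) character offsets of each token when joined with a separator of length L
def pvOffs (L : Int) : Int → List (List Char) → List (Int × Int)
  | _, [] => []
  | cp, t :: ts => (cp, cp + (t.length : Int)) :: pvOffs L (cp + (t.length : Int) + L) ts

-- Pre_ is exactly the set of inputs on which Python A returns: it excludes only inputs where A
-- raises — tokens present but trigger_pos has fewer than two entries (IndexError), or a trigger
-- boundary matches a token boundary but markers[type][0]/[1] is missing (KeyError/IndexError).
def Pre_insert_marker (text : String) (type : String) (trigger_pos : List Int) (markers : List (String × List String)) (whitespace : Bool) : Prop :=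
  let space : List Char := if whitespace then [' '] else []
  let offs := pvOffs (space.length : Int) 0 (PySem.Chars.split₀ text.toList)
  offs = [] ∨
    (2 ≤ trigger_pos.length ∧
      ((∃ x ∈ offs, x.1 = PySem.List.pyGetD trigger_pos 0 0) →
        1 ≤ (PySem.Dict.getD (PySem.Dict.mk markers) type []).length) ∧
      ((∃ x ∈ offs, x.2 = PySem.List.pyGetD trigger_pos 1 0) →
        2 ≤ (PySem.Dict.getD (PySem.Dict.mk markers) type []).length))
instance (text : String) (type : String) (trigger_pos : List Int) (markers : List (String × List String)) (whitespace : Bool) : Decidable (Pre_insert_marker text type trigger_pos markers whitespace) := by unfold Pre_insert_marker; infer_instance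

def pvWitness_insert_marker : String × String × List Int × (List (String × List String)) × Bool :=
  ("a b", "t", [0, 3], [("t", ["<t>", "</t>"])], true)

def Spec_insert_marker (text : String) (type : String) (trigger_pos : List Int) (markers : List (String × List String)) (whitespace : Bool) (out : String) : Prop := out = insert_marker_alt text type trigger_pos markers whitespace
instance (text : String) (type : String) (trigger_pos : List Int) (markers : List (String × List String)) (whitespace : Bool) (out : String) : Decidable (Spec_insert_marker text type trigger_pos markers whitespace out) := by unfold Spec_insert_marker; infer_instance

-- ===== CLAIM (what is proved, stated in full; the proofs are below) =====
def Claim_equal_insert_marker : Prop := ∀ (text : String) (type : String) (trigger_pos : List Int) (markers : List (String × List String)) (whitespace : Bool), Dom_insert_marker text type trigger_pos markers whitespace → Pre_insert_marker text type trigger_pos markers whitespace → Spec_insert_marker text type trigger_pos markers whitespace (insert_marker text type trigger_pos markers whitespace)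

-- ===== LEMMAS AND PROOFS =====

-- what A's loop appends for a suffix of tokens starting at char offset cp
def pvRender (sp : List Char) (t0 t1 : Int) (m0 m1 : List Char) : List (List Char) → Int → List Char
  | [], _ => []
  | t :: ts, cp =>
    (if cp = t0 then m0 ++ sp else []) ++ t ++ sp ++
    (if cp + (t.length : Int) + (sp.length : Int) = t1 + (sp.length : Int) then m1 ++ sp else []) ++
    pvRender sp t0 t1 m0 m1 ts (cp + (t.length : Int) + (sp.length : Int))

-- what B's assembly loop appends for a suffix of tokens starting at index i
def pvParts (o c : Option Int) (m0 m1 : List Char) : List (List Char) → Int → List (List Char)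
  | [], _ => []
  | t :: ts, i =>
    (if o = some i then [m0] else []) ++ [t] ++ (if c = some i then [m1] else []) ++
    pvParts o c m0 m1 ts (i + 1)

theorem pvWitness_ok :
    Dom_insert_marker (pvWitness_insert_marker.1) (pvWitness_insert_marker.2.1) (pvWitness_insert_marker.2.2.1) (pvWitness_insert_marker.2.2.2.1) (pvWitness_insert_marker.2.2.2.2) ∧
    Pre_insert_marker (pvWitness_insert_marker.1) (pvWitness_insert_marker.2.1) (pvWitness_insert_marker.2.2.1) (pvWitness_insert_marker.2.2.2.1) (pvWitness_insert_marker.2.2.2.2) := by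
  decide

theorem pvFoldA (trigger_pos : List Int) (markers : List (String × List String)) (type : String) (sp : List Char) :
    ∀ (ts : List (List Char)) (m : List Char) (cp : Int),
    (ts.foldl (fun (p : List Char × Int) token =>
      let markered := if p.2 = PySem.List.pyGetD trigger_pos 0 0 then
          p.1 ++ (PySem.List.pyGetD (PySem.Dict.getD (PySem.Dict.mk markers) type []) 0 "").toList ++ sp
        else p.1
      let char_pos := p.2 + (token.length : Int) + (sp.length : Int)
      let markered := markered ++ token ++ sp
      let markered := if char_pos = PySem.List.pyGetD trigger_pos 1 0 + (sp.length : Int) then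
          markered ++ (PySem.List.pyGetD (PySem.Dict.getD (PySem.Dict.mk markers) type []) 1 "").toList ++ sp
        else markered
      (markered, char_pos)) (m, cp)).1
    = m ++ pvRender sp (PySem.List.pyGetD trigger_pos 0 0) (PySem.List.pyGetD trigger_pos 1 0)
        ((PySem.List.pyGetD (PySem.Dict.getD (PySem.Dict.mk markers) type []) 0 "").toList)
        ((PySem.List.pyGetD (PySem.Dict.getD (PySem.Dict.mk markers) type []) 1 "").toList) ts cp := by
  intro ts
  induction ts with
  | nil => intro m cp; simp [pvRender]
  | cons t ts ih =>
    intro m cp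
    rw [List.foldl_cons]
    show (List.foldl _ (_, _) ts).1 = _
    rw [ih]
    simp only [pvRender]
    split_ifs <;> simp [List.append_assoc]

theorem pvFoldOffs (sp : List Char) :
    ∀ (ts : List (List Char)) (acc : List (Int × Int)) (cp : Int),
    (ts.foldl (fun (p : List (Int × Int) × Int) tok =>
      (p.1 ++ [(p.2, p.2 + (tok.length : Int))], p.2 + (tok.length : Int) + (sp.length : Int))) (acc, cp)).1
    = acc ++ pvOffs (sp.length : Int) cp ts := by
  intro ts
  induction ts with
  | nil => intro acc cp; simp [pvOffs]
  | cons t ts ih =>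
    intro acc cp
    rw [List.foldl_cons, ih]
    simp [pvOffs]

theorem pvFoldParts (o c : Option Int) (m0 m1 : List Char) :
    ∀ (ts : List (List Char)) (i : Int) (acc : List (List Char)),
    ((PySem.List.enumerate ts i).foldl (fun (acc : List (List Char)) p =>
      if c == some p.1 then ((if o == some p.1 then acc ++ [m0] else acc) ++ [p.2]) ++ [m1]
      else (if o == some p.1 then acc ++ [m0] else acc) ++ [p.2]) acc)
    = acc ++ pvParts o c m0 m1 ts i := by
  intro ts
  induction ts with
  | nil => intro i acc; simp [pvParts, PySem.List.enumerate_nil]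
  | cons t ts ih =>
    intro i acc
    rw [PySem.List.enumerate_cons, List.foldl_cons, ih]
    simp only [pvParts]
    split_ifs with h1 h2 h2 <;> simp_all [List.append_assoc]

theorem pvOffs_lb (L : Int) (hL : 0 ≤ L) :
    ∀ (ts : List (List Char)) (cp : Int), ∀ x ∈ pvOffs L cp ts, cp ≤ x.1 ∧ cp ≤ x.2 := by
  intro ts
  induction ts with
  | nil => intro cp x hx; simp [pvOffs] at hx
  | cons t ts ih =>
    intro cp x hx
    simp only [pvOffs, List.mem_cons] at hx
    rcases hx with rfl | hx
    · constructor <;> simp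
    · have := ih (cp + (t.length : Int) + L) x hx
      omega

theorem pvOffs_pairwise_fst (L : Int) (hL : 0 ≤ L) :
    ∀ (ts : List (List Char)) (cp : Int), (∀ t ∈ ts, t ≠ []) →
    (pvOffs L cp ts).Pairwise (fun a b => a.1 < b.1) := by
  intro ts
  induction ts with
  | nil => intro cp _; simp [pvOffs]
  | cons t ts ih =>
    intro cp hne
    have ht : 1 ≤ (t.length : Int) := by
      have : t ≠ [] := hne t (by simp)
      have := List.length_pos_of_ne_nil this
      omega
    simp only [pvOffs]
    refine List.Pairwise.cons ?_ (ih _ (fun u hu => hne u (by simp [hu])))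
    intro x hx
    have := pvOffs_lb L hL ts (cp + (t.length : Int) + L) x hx
    simp only
    omega

theorem pvOffs_pairwise_snd (L : Int) (hL : 0 ≤ L) :
    ∀ (ts : List (List Char)) (cp : Int), (∀ t ∈ ts, t ≠ []) →
    (pvOffs L cp ts).Pairwise (fun a b => a.2 < b.2) := by
  intro ts
  induction ts with
  | nil => intro cp _; simp [pvOffs]
  | cons t ts ih =>
    intro cp hne
    simp only [pvOffs]
    refine List.Pairwise.cons ?_ (ih _ (fun u hu => hne u (by simp [hu])))
    intro x hx
    have hlb := pvOffs_lb L hL ts (cp + (t.length : Int) + L) x hx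
    have hx2 : ∀ (us : List (List Char)) (c : Int), (∀ u ∈ us, u ≠ []) → ∀ y ∈ pvOffs L c us, y.1 + 1 ≤ y.2 := by
      intro us
      induction us with
      | nil => intro cc _ y hy; simp [pvOffs] at hy
      | cons u us ih2 =>
        intro cc hne2 y hy
        simp only [pvOffs, List.mem_cons] at hy
        rcases hy with rfl | hy
        · have : u ≠ [] := hne2 u (by simp)
          have := List.length_pos_of_ne_nil this
          simp only
          omega
        · exact ih2 _ (fun w hw => hne2 w (by simp [hw])) y hy
    have := hx2 ts _ (fun u hu => hne u (by simp [hu])) x hx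
    simp only
    omega

theorem pvFind (f : Int × Int → Int) (xs : List (Int × Int)) (i : Int) (v : Int)
    (hpw : xs.Pairwise (fun a b => f a < f b)) (k : Nat) (hk : k < xs.length) :
    (((PySem.List.enumerate xs i).find? (fun p => f p.2 == v)).map (·.1) = some (i + (k : Int)))
      ↔ f xs[k] = v := by
  constructor
  · intro h
    rw [Option.map_eq_some_iff] at h
    obtain ⟨a, ha, hai⟩ := h
    have hpred := List.find?_some ha
    have hmem := List.mem_of_find?_eq_some ha
    rw [PySem.List.mem_enumerate_iff] at hmem
    obtain ⟨m, hm, rfl⟩ := hmem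
    simp only at hai
    have hmk : m = k := by omega
    subst hmk
    simpa using hpred
  · intro hv
    have hmem : ((i + (k : Int)), xs[k]) ∈ PySem.List.enumerate xs i := by
      rw [PySem.List.mem_enumerate_iff]
      exact ⟨k, hk, rfl⟩
    have hsome : ((PySem.List.enumerate xs i).find? (fun p => f p.2 == v)).isSome := by
      rw [List.find?_isSome]
      exact ⟨_, hmem, by simpa using hv⟩
    obtain ⟨a, ha⟩ := Option.isSome_iff_exists.mp hsome
    have hpred := List.find?_some ha
    have hmem2 := List.mem_of_find?_eq_some ha
    rw [PySem.List.mem_enumerate_iff] at hmem2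
    obtain ⟨m, hm, rfl⟩ := hmem2
    simp only [beq_iff_eq] at hpred
    have hmk : m = k := by
      by_contra hne
      rcases Nat.lt_or_ge m k with hlt | hge
      · have := (List.pairwise_iff_getElem.mp hpw) m k hm hk hlt
        omega
      · have hlt : k < m := by omega
        have := (List.pairwise_iff_getElem.mp hpw) k m hk hm hlt
        omega
    subst hmk
    rw [ha]
    rfl

theorem pvRender_eq (sp : List Char) (t0 t1 : Int) (m0 m1 : List Char) (o c : Option Int) :
    ∀ (ts : List (List Char)) (i : Int) (cp : Int),
    (∀ (k : Nat) (hk : k < (pvOffs (sp.length : Int) cp ts).length),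
        ((pvOffs (sp.length : Int) cp ts)[k].1 = t0 ↔ o = some (i + (k : Int)))) →
    (∀ (k : Nat) (hk : k < (pvOffs (sp.length : Int) cp ts).length),
        ((pvOffs (sp.length : Int) cp ts)[k].2 = t1 ↔ c = some (i + (k : Int)))) →
    pvRender sp t0 t1 m0 m1 ts cp = ((pvParts o c m0 m1 ts i).map (· ++ sp)).flatten := by
  intro ts
  induction ts with
  | nil => intro i cp _ _; simp [pvRender, pvParts]
  | cons t ts ih =>
    intro i cp hop hcl
    have hopen : cp = t0 ↔ o = some i := by
      have := hop 0 (by simp [pvOffs])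
      simpa [pvOffs] using this
    have hclose : cp + (t.length : Int) + (sp.length : Int) = t1 + (sp.length : Int) ↔ c = some i := by
      have := hcl 0 (by simp [pvOffs])
      simp only [pvOffs] at this
      rw [add_left_inj]
      simpa using this
    have hop' : ∀ (k : Nat) (hk : k < (pvOffs (sp.length : Int) (cp + (t.length : Int) + (sp.length : Int)) ts).length),
        ((pvOffs (sp.length : Int) (cp + (t.length : Int) + (sp.length : Int)) ts)[k].1 = t0 ↔ o = some ((i + 1) + (k : Int))) := by
      intro k hk
      have hk' : k + 1 < (pvOffs (sp.length : Int) cp (t :: ts)).length := by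
        simp only [pvOffs, List.length_cons]
        omega
      have := hop (k + 1) hk'
      have harith : i + ((k + 1 : Nat) : Int) = (i + 1) + (k : Int) := by push_cast; ring
      rw [harith] at this
      simpa [pvOffs] using this
    have hcl' : ∀ (k : Nat) (hk : k < (pvOffs (sp.length : Int) (cp + (t.length : Int) + (sp.length : Int)) ts).length),
        ((pvOffs (sp.length : Int) (cp + (t.length : Int) + (sp.length : Int)) ts)[k].2 = t1 ↔ c = some ((i + 1) + (k : Int))) := by
      intro k hk
      have hk' : k + 1 < (pvOffs (sp.length : Int) cp (t :: ts)).length := by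
        simp only [pvOffs, List.length_cons]
        omega
      have := hcl (k + 1) hk'
      have harith : i + ((k + 1 : Nat) : Int) = (i + 1) + (k : Int) := by push_cast; ring
      rw [harith] at this
      simpa [pvOffs] using this
    have ihh := ih (i + 1) (cp + (t.length : Int) + (sp.length : Int)) hop' hcl'
    simp only [pvRender, pvParts, ihh]
    rw [if_congr hopen rfl rfl, if_congr hclose rfl rfl]
    by_cases h1 : o = some i <;> by_cases h2 : c = some i <;>
      simp [h1, h2, List.append_assoc]

theorem pvSplit_ne_aux : ∀ (s cur : List Char) (acc : List (List Char)),
    (∀ t ∈ acc, t ≠ []) → ∀ t ∈ PySem.Chars.split₀.go s cur acc, t ≠ [] := by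
  intro s
  induction s with
  | nil =>
    intro cur acc hacc t ht
    simp only [PySem.Chars.split₀.go] at ht
    by_cases h : cur.isEmpty
    · rw [if_pos h] at ht
      exact hacc t (by simpa using ht)
    · rw [if_neg h] at ht
      simp only [List.mem_reverse, List.mem_cons] at ht
      rcases ht with rfl | ht
      · simp only [ne_eq, List.reverse_eq_nil_iff]
        simpa [List.isEmpty_iff] using h
      · exact hacc t ht
  | cons ch rest ih =>
    intro cur acc hacc t ht
    simp only [PySem.Chars.split₀.go] at ht
    by_cases hs : PySem.Chars.isspace ch
    · rw [if_pos hs] at ht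
      by_cases h : cur.isEmpty
      · rw [if_pos h] at ht
        exact ih [] acc hacc t ht
      · rw [if_neg h] at ht
        refine ih [] (cur.reverse :: acc) ?_ t ht
        intro u hu
        rcases List.mem_cons.mp hu with rfl | hu
        · simp only [ne_eq, List.reverse_eq_nil_iff]
          simpa [List.isEmpty_iff] using h
        · exact hacc u hu
    · rw [if_neg hs] at ht
      exact ih (ch :: cur) acc hacc t ht

theorem pvSplit_ne (cs : List Char) : ∀ t ∈ PySem.Chars.split₀ cs, t ≠ [] := by
  intro t ht
  exact pvSplit_ne_aux cs [] [] (by simp) t ht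

theorem pvFlatten_join (sp : List Char) :
    ∀ (parts : List (List Char)), parts ≠ [] →
    ((parts.map (· ++ sp)).flatten) = PySem.Chars.join sp parts ++ sp := by
  intro parts
  induction parts with
  | nil => intro h; simp at h
  | cons p ps ih =>
    intro _
    cases ps with
    | nil => simp [PySem.Chars.join_singleton]
    | cons q qs =>
      simp only [List.map_cons, List.flatten_cons] at ih ⊢
      rw [ih (by simp), PySem.Chars.join_cons_cons]
      simp [List.append_assoc]

theorem pvStrip_space (x : List Char) : PySem.Chars.strip (x ++ [' ']) = PySem.Chars.strip x := by
  simp only [PySem.Chars.strip, PySem.Chars.lstrip, PySem.Chars.rstrip]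
  rw [List.dropWhile_append]
  by_cases h : (List.dropWhile PySem.Chars.isspace x).isEmpty
  · simp only [h, if_true]
    have h1 : List.dropWhile PySem.Chars.isspace [' '] = [] := by decide
    rw [h1]
    have h2 : List.dropWhile PySem.Chars.isspace x = [] := by simpa [List.isEmpty_iff] using h
    rw [h2]
  · rw [if_neg (by simpa using h)]
    rw [List.reverse_append]
    simp only [List.reverse_cons, List.reverse_nil, List.nil_append, List.singleton_append]
    rw [List.dropWhile_cons_of_pos (by decide)]

theorem pvParts_ne (o c : Option Int) (m0 m1 : List Char) (t : List Char) (ts : List (List Char)) (i : Int) :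
    pvParts o c m0 m1 (t :: ts) i ≠ [] := by
  simp only [pvParts]
  intro h
  simp at h

-- ===== VERDICT (by name: the statement is the Claim_ definition above) =====
theorem insert_marker_spec : Claim_equal_insert_marker := by
  intro text type trigger_pos markers whitespace _hdom _hpre
  unfold Spec_insert_marker
  simp only [insert_marker, insert_marker_alt]
  by_cases htoks : PySem.Chars.split₀ text.toList = []
  · rw [if_pos htoks, htoks]
    simp [PySem.Chars.strip, PySem.Chars.lstrip, PySem.Chars.rstrip]
  · rw [if_neg htoks]
    cases whitespace with
    | true =>
    rw [if_pos rfl]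
    rw [pvFoldA, pvFoldOffs]
    simp only [List.nil_append]
    have hparts := pvFoldParts
        (((PySem.List.enumerate (pvOffs ((([' '] : List Char).length : Int)) 0 (PySem.Chars.split₀ text.toList)) 0).find?
            (fun p => p.2.1 == PySem.List.pyGetD trigger_pos 0 0)).map (·.1))
        (((PySem.List.enumerate (pvOffs ((([' '] : List Char).length : Int)) 0 (PySem.Chars.split₀ text.toList)) 0).find?
            (fun p => p.2.2 == PySem.List.pyGetD trigger_pos 1 0)).map (·.1))
        ((PySem.List.pyGetD (PySem.Dict.getD (PySem.Dict.mk markers) type []) 0 "").toList)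
        ((PySem.List.pyGetD (PySem.Dict.getD (PySem.Dict.mk markers) type []) 1 "").toList)
        (PySem.Chars.split₀ text.toList) 0 []
    rw [List.nil_append] at hparts
    refine Eq.trans ?_ (congrArg (fun l => String.ofList (PySem.Chars.strip (PySem.Chars.join ([' '] : List Char) l))) hparts).symm
    beta_reduce
    have hne : ∀ t ∈ PySem.Chars.split₀ text.toList, t ≠ [] := pvSplit_ne text.toList
    have hL : (0 : Int) ≤ (([' '] : List Char).length : Int) := by simp
    have hpwf := pvOffs_pairwise_fst ((([' '] : List Char).length : Int)) hL (PySem.Chars.split₀ text.toList) 0 hne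
    have hpws := pvOffs_pairwise_snd ((([' '] : List Char).length : Int)) hL (PySem.Chars.split₀ text.toList) 0 hne
    have hop := fun (k : Nat) (hk : k < (pvOffs ((([' '] : List Char).length : Int)) 0 (PySem.Chars.split₀ text.toList)).length) =>
      (pvFind Prod.fst (pvOffs ((([' '] : List Char).length : Int)) 0 (PySem.Chars.split₀ text.toList)) 0
        (PySem.List.pyGetD trigger_pos 0 0) hpwf k hk).symm
    have hcl := fun (k : Nat) (hk : k < (pvOffs ((([' '] : List Char).length : Int)) 0 (PySem.Chars.split₀ text.toList)).length) =>
      (pvFind Prod.snd (pvOffs ((([' '] : List Char).length : Int)) 0 (PySem.Chars.split₀ text.toList)) 0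
        (PySem.List.pyGetD trigger_pos 1 0) hpws k hk).symm
    rw [pvRender_eq ([' ']) _ _ _ _ _ _ _ 0 0 hop hcl]
    have hpne : pvParts
        (((PySem.List.enumerate (pvOffs ((([' '] : List Char).length : Int)) 0 (PySem.Chars.split₀ text.toList)) 0).find?
            (fun p => p.2.1 == PySem.List.pyGetD trigger_pos 0 0)).map (·.1))
        (((PySem.List.enumerate (pvOffs ((([' '] : List Char).length : Int)) 0 (PySem.Chars.split₀ text.toList)) 0).find?
            (fun p => p.2.2 == PySem.List.pyGetD trigger_pos 1 0)).map (·.1))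
        ((PySem.List.pyGetD (PySem.Dict.getD (PySem.Dict.mk markers) type []) 0 "").toList)
        ((PySem.List.pyGetD (PySem.Dict.getD (PySem.Dict.mk markers) type []) 1 "").toList)
        (PySem.Chars.split₀ text.toList) 0 ≠ [] := by
      cases hts : PySem.Chars.split₀ text.toList with
      | nil => exact absurd hts htoks
      | cons a b => exact pvParts_ne _ _ _ _ a b 0
    rw [pvFlatten_join ([' ']) _ hpne]
    rw [pvStrip_space]
    | false =>
    rw [if_neg (by simp)]
    rw [pvFoldA, pvFoldOffs]
    simp only [List.nil_append]
    have hparts := pvFoldParts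
        (((PySem.List.enumerate (pvOffs (((([] : List Char) : List Char).length : Int)) 0 (PySem.Chars.split₀ text.toList)) 0).find?
            (fun p => p.2.1 == PySem.List.pyGetD trigger_pos 0 0)).map (·.1))
        (((PySem.List.enumerate (pvOffs (((([] : List Char) : List Char).length : Int)) 0 (PySem.Chars.split₀ text.toList)) 0).find?
            (fun p => p.2.2 == PySem.List.pyGetD trigger_pos 1 0)).map (·.1))
        ((PySem.List.pyGetD (PySem.Dict.getD (PySem.Dict.mk markers) type []) 0 "").toList)
        ((PySem.List.pyGetD (PySem.Dict.getD (PySem.Dict.mk markers) type []) 1 "").toList)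
        (PySem.Chars.split₀ text.toList) 0 []
    rw [List.nil_append] at hparts
    refine Eq.trans ?_ (congrArg (fun l => String.ofList (PySem.Chars.strip (PySem.Chars.join (([] : List Char) : List Char) l))) hparts).symm
    beta_reduce
    have hne : ∀ t ∈ PySem.Chars.split₀ text.toList, t ≠ [] := pvSplit_ne text.toList
    have hL : (0 : Int) ≤ ((([] : List Char) : List Char).length : Int) := by simp
    have hpwf := pvOffs_pairwise_fst (((([] : List Char) : List Char).length : Int)) hL (PySem.Chars.split₀ text.toList) 0 hne
    have hpws := pvOffs_pairwise_snd (((([] : List Char) : List Char).length : Int)) hL (PySem.Chars.split₀ text.toList) 0 hne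
    have hop := fun (k : Nat) (hk : k < (pvOffs (((([] : List Char) : List Char).length : Int)) 0 (PySem.Chars.split₀ text.toList)).length) =>
      (pvFind Prod.fst (pvOffs (((([] : List Char) : List Char).length : Int)) 0 (PySem.Chars.split₀ text.toList)) 0
        (PySem.List.pyGetD trigger_pos 0 0) hpwf k hk).symm
    have hcl := fun (k : Nat) (hk : k < (pvOffs (((([] : List Char) : List Char).length : Int)) 0 (PySem.Chars.split₀ text.toList)).length) =>
      (pvFind Prod.snd (pvOffs (((([] : List Char) : List Char).length : Int)) 0 (PySem.Chars.split₀ text.toList)) 0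
        (PySem.List.pyGetD trigger_pos 1 0) hpws k hk).symm
    rw [pvRender_eq (([] : List Char)) _ _ _ _ _ _ _ 0 0 hop hcl]
    have hpne : pvParts
        (((PySem.List.enumerate (pvOffs (((([] : List Char) : List Char).length : Int)) 0 (PySem.Chars.split₀ text.toList)) 0).find?
            (fun p => p.2.1 == PySem.List.pyGetD trigger_pos 0 0)).map (·.1))
        (((PySem.List.enumerate (pvOffs (((([] : List Char) : List Char).length : Int)) 0 (PySem.Chars.split₀ text.toList)) 0).find?
            (fun p => p.2.2 == PySem.List.pyGetD trigger_pos 1 0)).map (·.1))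
        ((PySem.List.pyGetD (PySem.Dict.getD (PySem.Dict.mk markers) type []) 0 "").toList)
        ((PySem.List.pyGetD (PySem.Dict.getD (PySem.Dict.mk markers) type []) 1 "").toList)
        (PySem.Chars.split₀ text.toList) 0 ≠ [] := by
      cases hts : PySem.Chars.split₀ text.toList with
      | nil => exact absurd hts htoks
      | cons a b => exact pvParts_ne _ _ _ _ a b 0
    rw [pvFlatten_join (([] : List Char)) _ hpne]
    simp
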